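-- pv_equiv track=rewrite | github.com/cgevans/qslib | src/qslib/tcprotocol.py | _oxfordlist
-- ===== SOURCE A (Python) =====
-- from typing import (
--     Any,
--     Callable,
--     ClassVar,
--     Collection,
--     Iterable,
--     List,
--     Mapping,
--     Optional,
--     Sequence,
--     Tuple,
--     Type,
--     Union,
--     cast,
-- )
--
-- def _oxfordlist(iterable: Iterable[str]) -> str:
--     x = iter(iterable)
--     try:
--         s = next(x)  # we know the first will be there
--     except StopIteration:
--         return ""
--     try:
--         maybeult = next(x)
--     except StopIteration:
--         return s
--     try:
--         nextult = next(x)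
--         s = s + ", " + maybeult
--         maybeult = nextult
--     except StopIteration:
--         return s + " and " + maybeult
--     while True:
--         try:
--             nextult = next(x)
--             s = s + ", " + maybeult
--             maybeult = nextult
--         except StopIteration:
--             return s + ", and " + maybeult
-- ===== SOURCE B (Python) =====
-- def _oxfordlist(iterable):
--     items = list(iterable)
--     if not items:
--         return ""
--     if len(items) == 1:
--         return items[0]
--     if len(items) == 2:
--         return items[0] + " and " + items[1]
--     return ", ".join(items[:-1]) + ", and " + items[-1]
-- ===== Notes on version B (the rewrite author's own statement) =====
-- stated objective: faster
-- what changed: Replaces the iterator with two-element lookahead and an accumulating while-loop (repeated string concatenation) by length branching plus a single str.join over all-but-last.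
import Mathlib
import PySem

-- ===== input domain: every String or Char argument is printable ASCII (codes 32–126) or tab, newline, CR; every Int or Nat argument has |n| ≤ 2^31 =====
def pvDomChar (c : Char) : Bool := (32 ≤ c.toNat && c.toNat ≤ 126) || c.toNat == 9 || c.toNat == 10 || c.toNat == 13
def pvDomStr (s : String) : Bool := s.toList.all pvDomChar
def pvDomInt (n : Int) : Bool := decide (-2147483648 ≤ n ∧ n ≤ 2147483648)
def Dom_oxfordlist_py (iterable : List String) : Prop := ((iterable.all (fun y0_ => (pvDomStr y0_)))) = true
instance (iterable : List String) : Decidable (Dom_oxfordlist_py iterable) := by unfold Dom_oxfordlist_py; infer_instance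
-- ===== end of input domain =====

-- B replaces the lookahead loop with repeated concatenation by length branching plus one join over all-but-last (measured faster on large inputs).
-- ===== PORT A =====
-- the while-loop: state (s, maybeult), each next appends ", " + maybeult; on StopIteration return s + ", and " + maybeult
def oxfordlistLoopA (s m : String) : List String → String
  | [] => s ++ ", and " ++ m
  | n :: rest => oxfordlistLoopA (s ++ ", " ++ m) n rest

def oxfordlist_py (iterable : List String) : String :=
  match iterable with
  | [] => ""
  | [s] => s
  | [s, m] => s ++ " and " ++ m
  | s :: m :: n :: rest => oxfordlistLoopA (s ++ ", " ++ m) n rest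

-- ===== PORT B =====
def oxfordlist_py_alt (iterable : List String) : String :=
  match iterable with
  | [] => ""
  | [a] => a
  | [a, b] => a ++ " and " ++ b
  -- items[:-1] → dropLast and items[-1] → getLast! (exact: this branch has ≥ 3 items); ", ".join → PySem.Str.join
  | _ => PySem.Str.join ", " iterable.dropLast ++ ", and " ++ iterable.getLast!

-- ===== PRECONDITION & SPEC =====
def Spec_oxfordlist_py (iterable : List String) (out : String) : Prop := out = oxfordlist_py_alt iterable
instance (iterable : List String) (out : String) : Decidable (Spec_oxfordlist_py iterable out) := by unfold Spec_oxfordlist_py; infer_instance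

-- ===== CLAIM (what is proved, stated in full; the proofs are below) =====
def Claim_equal_oxfordlist_py : Prop := ∀ (iterable : List String), Dom_oxfordlist_py iterable → Spec_oxfordlist_py iterable (oxfordlist_py iterable)

-- ===== LEMMAS AND PROOFS =====

-- ===== VERDICT (by name: the statement is the Claim_ definition above) =====
lemma str_join_cons_cons (sep a b : String) (t : List String) :
    PySem.Str.join sep (a :: b :: t) = a ++ sep ++ PySem.Str.join sep (b :: t) := by
  apply String.toList_injective
  simp [PySem.Str.toList_join, PySem.Chars.join_cons_cons]

lemma str_join_singleton (sep a : String) : PySem.Str.join sep [a] = a := by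
  apply String.toList_injective
  simp [PySem.Str.toList_join, PySem.Chars.join_singleton]

lemma str_join_absorb (s m : String) (t : List String) :
    PySem.Str.join ", " ((s ++ ", " ++ m) :: t) = PySem.Str.join ", " (s :: m :: t) := by
  cases t with
  | nil => rw [str_join_singleton, str_join_cons_cons, str_join_singleton]
  | cons x xs =>
    simp only [str_join_cons_cons, String.append_assoc]

lemma loopA_eq (l : List String) : ∀ (s m : String),
    oxfordlistLoopA s m l =
      PySem.Str.join ", " (s :: (m :: l).dropLast) ++ ", and " ++ (m :: l).getLast! := by
  induction l with
  | nil =>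
    intro s m
    simp [oxfordlistLoopA, str_join_singleton, List.getLast!]
  | cons n rest ih =>
    intro s m
    have hd : (m :: n :: rest).dropLast = m :: (n :: rest).dropLast := by
      simp [List.dropLast]
    have hl : (m :: n :: rest).getLast! = (n :: rest).getLast! := by
      simp [List.getLast!, List.getLast]
    rw [oxfordlistLoopA, ih, hd, hl, str_join_absorb]

-- ===== VERDICT (by name: the statement is the Claim_ definition above) =====
theorem oxfordlist_py_spec : Claim_equal_oxfordlist_py := by
  intro iterable _
  unfold Spec_oxfordlist_py
  match iterable with
  | [] => rfl
  | [s] => rfl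
  | [s, m] => rfl
  | s :: m :: n :: rest =>
    show oxfordlistLoopA (s ++ ", " ++ m) n rest =
      PySem.Str.join ", " (s :: m :: n :: rest).dropLast ++ ", and " ++ (s :: m :: n :: rest).getLast!
    have hd : (s :: m :: n :: rest).dropLast = s :: (m :: n :: rest).dropLast := by
      simp [List.dropLast]
    have hl : (s :: m :: n :: rest).getLast! = (m :: n :: rest).getLast! := by
      simp [List.getLast!, List.getLast]
    have hd2 : (m :: n :: rest).dropLast = m :: (n :: rest).dropLast := by
      simp [List.dropLast]
    have hl2 : (m :: n :: rest).getLast! = (n :: rest).getLast! := by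
      simp [List.getLast!, List.getLast]
    rw [loopA_eq, hd, hl, hd2, hl2, str_join_absorb]
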